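-- pv_equiv track=rewrite | github.com/qkek984/ML_study | algorithm/programmers/longest_palindrop.py | check
-- ===== SOURCE A (Python) =====
-- def check(arr1, arr2):
--     answer = 0
--     len_arr1 = len(arr1)
--     len_arr2 = len(arr2)
--     if len_arr1 > len_arr2:
--         arr1=arr1[len_arr1-len_arr2:]
--     arr2 = list(arr2)
--     arr2.reverse()
--     arr2= ''.join(arr2)
--     for i in range(len_arr2):
--         this_answer = (len_arr2*2)-(i*2)
--         if answer >= this_answer:
--             break
--         elif arr1[i:]==arr2[i:]:
--             answer = this_answer
--     return answer
-- ===== SOURCE B (Python) =====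
-- def check(arr1, arr2):
--     n2 = len(arr2)
--     if len(arr1) < n2:
--         return 0
--     t = arr1[len(arr1) - n2:]
--     last = -1
--     for j, (a, b) in enumerate(zip(t, reversed(arr2))):
--         if a != b:
--             last = j
--     return 2 * (n2 - last - 1)
-- ===== Notes on version B (the rewrite author's own statement) =====
-- stated objective: faster
-- what changed: A compares whole suffixes arr1[i:] == reversed(arr2)[i:] for increasing i (quadratic); B makes one simultaneous pass over the trimmed arr1 and reversed arr2 recording the last mismatch index, and computes the answer by a closed formula from it.
import Mathlib
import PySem

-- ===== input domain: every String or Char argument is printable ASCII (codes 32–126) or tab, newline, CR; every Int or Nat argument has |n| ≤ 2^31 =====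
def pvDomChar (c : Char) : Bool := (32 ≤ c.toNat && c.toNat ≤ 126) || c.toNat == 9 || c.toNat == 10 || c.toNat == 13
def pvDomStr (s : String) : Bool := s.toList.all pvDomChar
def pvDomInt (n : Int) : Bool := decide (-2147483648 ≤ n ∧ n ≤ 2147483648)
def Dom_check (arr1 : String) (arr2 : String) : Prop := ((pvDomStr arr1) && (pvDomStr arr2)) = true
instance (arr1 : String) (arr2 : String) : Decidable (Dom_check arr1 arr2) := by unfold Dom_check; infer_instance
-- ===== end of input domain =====

-- B replaces A's loop of whole-suffix comparisons (quadratic) by a single simultaneous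
-- scan recording the last mismatch position, from which the answer is a closed formula.

-- ===== PORT A =====
-- the for-loop of A with its break; i counts up, `t.drop i` / `r.drop i` is exactly
-- Python's s[i:] for the nonnegative i the loop uses
def checkLoop (t r : List Char) (len2 : Nat) (i : Nat) (answer : Int) : Int :=
  if i < len2 then
    let this_answer : Int := ((len2 : Int)) * 2 - ((i : Int)) * 2
    if answer ≥ this_answer then answer
    else if t.drop i = r.drop i then checkLoop t r len2 (i + 1) this_answer
    else checkLoop t r len2 (i + 1) answer
  else answer
termination_by len2 - i

def check (arr1 : String) (arr2 : String) : Int :=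
  let l1 := arr1.toList
  let l2 := arr2.toList
  let len_arr1 := l1.length
  let len_arr2 := l2.length
  -- arr1 = arr1[len_arr1-len_arr2:] when longer; index is nonnegative there, so drop is exact
  let t := if len_arr1 > len_arr2 then l1.drop (len_arr1 - len_arr2) else l1
  let r := l2.reverse
  checkLoop t r len_arr2 0 0

-- ===== PORT B =====
-- one pass over zip(t, reversed(arr2)) recording the index of the last mismatch
def lastMismatch : List Char → List Char → Int → Int → Int
  | a :: as, b :: bs, j, last => lastMismatch as bs (j + 1) (if a ≠ b then j else last)
  | _, _, _, last => last

def check_alt (arr1 : String) (arr2 : String) : Int :=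
  let l1 := arr1.toList
  let l2 := arr2.toList
  let n2 := l2.length
  if l1.length < n2 then 0
  else
    let t := l1.drop (l1.length - n2)
    let last := lastMismatch t l2.reverse 0 (-1)
    2 * ((n2 : Int) - last - 1)

-- ===== PRECONDITION & SPEC =====
def Spec_check (arr1 : String) (arr2 : String) (out : Int) : Prop := out = check_alt arr1 arr2
instance (arr1 : String) (arr2 : String) (out : Int) : Decidable (Spec_check arr1 arr2 out) := by unfold Spec_check; infer_instance

-- ===== CLAIM (what is proved, stated in full; the proofs are below) =====
def Claim_equal_check : Prop := ∀ (arr1 : String) (arr2 : String), Dom_check arr1 arr2 → Spec_check arr1 arr2 (check arr1 arr2)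

-- ===== LEMMAS AND PROOFS =====

-- relative index of the LAST mismatch between two lists (none = no mismatch)
def gMis : List Char → List Char → Option Nat
  | a :: as, b :: bs =>
      match gMis as bs with
      | some k => some (k + 1)
      | none => if a ≠ b then some 0 else none
  | _, _ => none

lemma lastMismatch_eq (t : List Char) : ∀ (r : List Char) (j last : Int),
    lastMismatch t r j last =
      match gMis t r with
      | some k => j + (k : Int)
      | none => last := by
  induction t with
  | nil => intro r j last; cases r <;> simp [lastMismatch, gMis]
  | cons a as ih =>
      intro r j last
      cases r with
      | nil => simp [lastMismatch, gMis]
      | cons b bs =>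
          simp only [lastMismatch, gMis, ih]
          cases h : gMis as bs with
          | some k => push_cast; ring_nf
          | none => by_cases hab : a = b <;> simp [hab]

-- drop i t = drop i r  ↔  i is past the last mismatch (for equal-length lists)
lemma drop_eq_iff (t : List Char) : ∀ (r : List Char), t.length = r.length → ∀ (i : Nat),
    (t.drop i = r.drop i ↔ (match gMis t r with
                            | some k => k < i
                            | none => True)) := by
  induction t with
  | nil =>
      intro r hr i
      cases r with
      | nil => simp [gMis]
      | cons b bs => simp at hr
  | cons a as ih =>
      intro r hr i
      cases r with
      | nil => simp at hr
      | cons b bs =>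
          simp only [List.length_cons, Nat.succ_inj] at hr
          cases i with
          | zero =>
              simp only [List.drop_zero]
              have h0 := (ih bs hr 0)
              simp only [List.drop_zero] at h0
              cases h : gMis as bs with
              | some k =>
                  simp only [h] at h0
                  simp only [gMis, h]
                  constructor
                  · intro he
                    injection he with hab htl
                    exact absurd (h0.mp htl) (by omega)
                  · intro hk; exact absurd hk (by omega)
              | none =>
                  simp only [h] at h0
                  simp only [gMis, h]
                  by_cases hab : a = b
                  · simp [hab, h0.mpr trivial]
                  · simp [hab]
          | succ i' =>
              simp only [List.drop_succ_cons]
              have h0 := ih bs hr i'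
              cases h : gMis as bs with
              | some k =>
                  simp only [h] at h0
                  simp only [gMis, h]
                  rw [h0]; omega
              | none =>
                  simp only [h] at h0
                  simp only [gMis, h]
                  by_cases hab : a = b <;> simp [hab, h0]

-- the first index from which the suffixes agree
def mIdx (t r : List Char) : Nat :=
  match gMis t r with
  | some k => k + 1
  | none => 0

lemma drop_eq_iff_m (t r : List Char) (h : t.length = r.length) (i : Nat) :
    (t.drop i = r.drop i ↔ mIdx t r ≤ i) := by
  rw [drop_eq_iff t r h i]
  unfold mIdx
  cases gMis t r with
  | none => simp
  | some k => simp

lemma mIdx_le_length (t r : List Char) (h : t.length = r.length) : mIdx t r ≤ t.length := by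
  by_contra hlt
  have := (drop_eq_iff_m t r h t.length).mp (by
    rw [List.drop_length, h, List.drop_length])
  omega

-- once answer is already ≥ the next this_answer, the loop returns it at once
lemma checkLoop_done (t r : List Char) (n i : Nat) (a : Int)
    (ha : a ≥ ((n : Int)) * 2 - (((i : Nat) : Int)) * 2) :
    checkLoop t r n i a = a := by
  rw [checkLoop]
  by_cases h1 : i < n
  · rw [if_pos h1, if_pos ha]
  · rw [if_neg h1]

lemma checkLoop_run (t r : List Char) (n : Nat) (ht : t.length = n) (hr : r.length = n) :
    ∀ (i : Nat), i ≤ n → (∀ j, j < i → t.drop j ≠ r.drop j) →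
      checkLoop t r n i 0 = 2 * ((n : Int) - (mIdx t r : Int)) := by
  have hlen : t.length = r.length := by omega
  intro i
  induction hn : n - i using Nat.strong_induction_on generalizing i with
  | _ fuel ih =>
    intro hi hpre
    by_cases hin : i < n
    · rw [checkLoop]
      simp only [hin, if_true]
      have hthis : ¬ ((0 : Int) ≥ ((n : Int)) * 2 - ((i : Nat) : Int) * 2) := by
        omega
      rw [if_neg hthis]
      by_cases heq : t.drop i = r.drop i
      · rw [if_pos heq]
        have hm_le : mIdx t r ≤ i := (drop_eq_iff_m t r hlen i).mp heq
        have hm_ge : ¬ mIdx t r < i := by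
          intro hlt
          exact hpre (mIdx t r) hlt ((drop_eq_iff_m t r hlen (mIdx t r)).mpr le_rfl)
        have hm : mIdx t r = i := by omega
        rw [checkLoop_done t r n (i + 1) _ (by omega)]
        rw [hm]; ring
      · rw [if_neg heq]
        exact ih (n - (i + 1)) (by omega) (i + 1) rfl (by omega)
          (fun j hj => by
            rcases Nat.lt_succ_iff_lt_or_eq.mp hj with h | h
            · exact hpre j h
            · exact h ▸ heq)
    · rw [checkLoop]
      rw [if_neg hin]
      have hieq : i = n := by omega
      have hm_ge : ¬ mIdx t r < n := by
        intro hlt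
        exact hpre (mIdx t r) (hieq ▸ hlt) ((drop_eq_iff_m t r hlen (mIdx t r)).mpr le_rfl)
      have := mIdx_le_length t r hlen
      have hm : mIdx t r = n := by omega
      rw [hm]; ring
  
-- if t is strictly shorter than r, no suffix comparison can succeed and the loop yields 0
lemma checkLoop_short (t r : List Char) (n : Nat) (ht : t.length < n) (hr : r.length = n) :
    ∀ (i : Nat), checkLoop t r n i 0 = 0 := by
  intro i
  induction hn : n - i using Nat.strong_induction_on generalizing i with
  | _ fuel ih =>
    by_cases hin : i < n
    · rw [checkLoop]
      simp only [hin, if_true]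
      have hthis : ¬ ((0 : Int) ≥ ((n : Int)) * 2 - ((i : Nat) : Int) * 2) := by
        omega
      rw [if_neg hthis]
      have hne : t.drop i ≠ r.drop i := by
        intro he
        have := congrArg List.length he
        simp only [List.length_drop] at this
        omega
      rw [if_neg hne]
      exact ih (n - (i + 1)) (by omega) (i + 1) rfl
    · rw [checkLoop, if_neg hin]

theorem check_eq_alt (arr1 arr2 : String) : check arr1 arr2 = check_alt arr1 arr2 := by
  unfold check check_alt
  set l1 := arr1.toList
  set l2 := arr2.toList
  simp only []
  by_cases hshort : l1.length < l2.length
  · rw [if_pos hshort, if_neg (by omega)]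
    exact checkLoop_short l1 l2.reverse l2.length hshort (List.length_reverse) 0
  · rw [if_neg hshort]
    have hn : l2.length ≤ l1.length := by omega
    have ht' : (if l1.length > l2.length then l1.drop (l1.length - l2.length) else l1)
        = l1.drop (l1.length - l2.length) := by
      by_cases hgt : l1.length > l2.length
      · rw [if_pos hgt]
      · rw [if_neg hgt]
        have : l1.length - l2.length = 0 := by omega
        rw [this, List.drop_zero]
    rw [ht']
    set t := l1.drop (l1.length - l2.length) with hTdef
    have htlen : t.length = l2.length := by
      rw [hTdef, List.length_drop]; omega
    have hrlen : l2.reverse.length = l2.length := List.length_reverse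
    rw [checkLoop_run t l2.reverse l2.length htlen hrlen 0 (by omega) (by omega)]
    rw [lastMismatch_eq]
    unfold mIdx
    cases h : gMis t l2.reverse with
    | some k => push_cast; ring
    | none => norm_num

-- ===== VERDICT (by name: the statement is the Claim_ definition above) =====
theorem check_spec : Claim_equal_check := by
  intro arr1 arr2 _
  unfold Spec_check
  exact check_eq_alt arr1 arr2
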